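-- pv_equiv track=rewrite | github.com/suhassatish/algorithms | app/puzzles_and_math/biggest_product_n_1_math.py | find_biggest_n_minus_one_product
-- ===== SOURCE A (Python) =====
-- def find_biggest_n_minus_one_product(A):
--     number_of_negatives = 0
--     least_nonnegative_idx = least_negative_idx = greatest_negative_idx = None
--
--     # Identify the least negative, greatest negative, and least nonnegative
--     # entries.
--     for i, e in enumerate(A):
--
--         if e < 0:  # e is a negative-element
--             number_of_negatives += 1
--
--             # update least-negative-index
--             if least_negative_idx is None or A[least_negative_idx] < e:
--                 least_negative_idx = i
--
--             # update greatest-negative-index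
--             if greatest_negative_idx is None or e < A[greatest_negative_idx]:
--                 greatest_negative_idx = i
--
--         else:  # element >= 0.
--             if least_nonnegative_idx is None or e < A[least_nonnegative_idx]:
--                 least_nonnegative_idx = i
--
--     if number_of_negatives % 2 == 1:  # odd-number of negatives, full_product will be negative
--         idx_to_skip = least_negative_idx
--
--     else:  # even-number of negatives (could also be 0 => all >= 0), full_product will be >= 0
--
--         if least_nonnegative_idx is not None:  # has at least 1 element >= 0
--             idx_to_skip = least_nonnegative_idx
--
--         else:  # all -ve elements
--             idx_to_skip = greatest_negative_idx
--
--     # idx_to_skip = (least_negative_idx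
--     #                if number_of_negatives % 2 else least_nonnegative_idx if
--     #                least_nonnegative_idx is not None else greatest_negative_idx)
--     # return functools.reduce(lambda product, e: product * e,
--     #                         # Use a generator rather than list comprehension to
--     #                         # avoid extra space.
--     #                         (e for i, e in enumerate(A) if i != idx_to_skip), 1)  # 1 is init val
--     return product_minus_skip_index(A, idx_to_skip)
--
-- def product_minus_skip_index(A, idx_to_skip):
--     prod = 1
--     for i, e in enumerate(A):
--         if i != idx_to_skip:
--             prod *= e
--     return prod
-- ===== SOURCE B (Python) =====
-- def find_biggest_n_minus_one_product(A):
--     # prefix/suffix products: candidate skipping i is prefix[i]*suffix[i+1]; return the max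
--     if not A:
--         return 1
--     tails = []          # tails[i] = product of A[i+1:], built back-to-front
--     right = 1
--     for x in reversed(A):
--         tails.append(right)
--         right *= x
--     tails.reverse()
--     best = None
--     left = 1
--     for x, t in zip(A, tails):
--         cand = left * t
--         if best is None or best < cand:
--             best = cand
--         left *= x
--     return best
-- ===== Notes on version B (the rewrite author's own statement) =====
-- stated objective: alternative
-- what changed: Replaces A's sign-counting selection of one index to skip by a prefix/suffix-products sweep that computes every skip-one candidate product and returns their maximum.
import Mathlib
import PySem

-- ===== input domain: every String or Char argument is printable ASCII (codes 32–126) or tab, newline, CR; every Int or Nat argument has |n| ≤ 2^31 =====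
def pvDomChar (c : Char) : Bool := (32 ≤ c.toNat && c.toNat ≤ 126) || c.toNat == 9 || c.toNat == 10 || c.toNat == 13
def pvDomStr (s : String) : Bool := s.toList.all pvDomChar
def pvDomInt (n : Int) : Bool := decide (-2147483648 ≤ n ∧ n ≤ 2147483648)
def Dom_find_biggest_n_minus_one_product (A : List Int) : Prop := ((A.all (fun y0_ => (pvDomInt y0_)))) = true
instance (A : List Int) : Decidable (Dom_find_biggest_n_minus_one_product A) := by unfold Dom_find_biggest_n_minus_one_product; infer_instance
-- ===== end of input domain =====

-- B replaces A's sign-counting index selection by a prefix/suffix-products sweep maximizing over all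
-- skip-one candidates; same return value, similar cost (objective: alternative).

-- ===== PORT A =====
-- selection loop state: (number_of_negatives, least_nonnegative, least_negative, greatest_negative),
-- each tracked entry stored as (index, value) — Python stores the index and re-reads A[idx]
def pvAStep (st : Int × Option (Int × Int) × Option (Int × Int) × Option (Int × Int)) (p : Int × Int) :
    Int × Option (Int × Int) × Option (Int × Int) × Option (Int × Int) :=
  let (cnt, lnn, ln, gn) := st
  let (i, e) := p
  if e < 0 then
    (cnt + 1,
     lnn,
     (match ln with
      | none => some (i, e)
      | some (j, w) => if w < e then some (i, e) else some (j, w)),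
     (match gn with
      | none => some (i, e)
      | some (j, w) => if e < w then some (i, e) else some (j, w)))
  else
    (cnt,
     (match lnn with
      | none => some (i, e)
      | some (j, w) => if e < w then some (i, e) else some (j, w)),
     ln, gn)

def product_minus_skip_index (A : List Int) (idx_to_skip : Option Int) : Int :=
  (PySem.List.enumerate A).foldl
    (fun prod p => if some p.1 ≠ idx_to_skip then prod * p.2 else prod) 1

def find_biggest_n_minus_one_product (A : List Int) : Int :=
  let st := (PySem.List.enumerate A).foldl pvAStep (0, none, none, none)
  let idx_to_skip : Option Int :=
    if PySem.Int.mod st.1 2 == 1 then st.2.2.1.map (·.1)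
    else match st.2.1 with
      | some p => some p.1
      | none => st.2.2.2.map (·.1)
  product_minus_skip_index A idx_to_skip

-- ===== PORT B =====
def find_biggest_n_minus_one_product_alt (A : List Int) : Int :=
  if A = [] then 1
  else
    -- tails[i] = product of A[i+1:], built back-to-front then reversed
    let tp := A.reverse.foldl (fun (st : List Int × Int) x => (st.1 ++ [st.2], st.2 * x)) ([], 1)
    let tails := tp.1.reverse
    -- one forward pass: cand = left * tails[i]; keep the best
    let res := (A.zip tails).foldl
      (fun (st : Option Int × Int) p =>
        ((match st.1 with
          | none => some (st.2 * p.2)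
          | some b => if b < st.2 * p.2 then some (st.2 * p.2) else some b), st.2 * p.1))
      (none, 1)
    res.1.getD 1

-- ===== PRECONDITION & SPEC =====
def Spec_find_biggest_n_minus_one_product (A : List Int) (out : Int) : Prop := out = find_biggest_n_minus_one_product_alt A
instance (A : List Int) (out : Int) : Decidable (Spec_find_biggest_n_minus_one_product A out) := by unfold Spec_find_biggest_n_minus_one_product; infer_instance

-- ===== CLAIM (what is proved, stated in full; the proofs are below) =====
def Claim_equal_find_biggest_n_minus_one_product : Prop := ∀ (A : List Int), Dom_find_biggest_n_minus_one_product A → Spec_find_biggest_n_minus_one_product A (find_biggest_n_minus_one_product A)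

-- ===== LEMMAS AND PROOFS =====

-- negativity predicate used throughout
def negP : Int → Bool := fun x => decide (x < 0)

-- generic running-extremum over an indexed scan: one function instantiated three times
def updGen (cond : Int → Bool) (better : Int → Int → Bool) :
    Option (Int × Int) → Int → List Int → Option (Int × Int)
  | o, _, [] => o
  | o, k, e :: xs =>
      updGen cond better
        (if cond e then
          (match o with
           | none => some (k, e)
           | some (j, w) => if better w e then some (k, e) else some (j, w))
         else o) (k + 1) xs

theorem updGen_nil (cond : Int → Bool) (better : Int → Int → Bool)
    (o : Option (Int × Int)) (k : Int) : updGen cond better o k [] = o := rfl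

theorem updGen_cons (cond : Int → Bool) (better : Int → Int → Bool)
    (o : Option (Int × Int)) (k : Int) (e : Int) (xs : List Int) :
    updGen cond better o k (e :: xs) =
      updGen cond better
        (if cond e then
          (match o with
           | none => some (k, e)
           | some (j, w) => if better w e then some (k, e) else some (j, w))
         else o) (k + 1) xs := rfl

def lnnUpd (o : Option (Int × Int)) (k : Int) (l : List Int) : Option (Int × Int) :=
  updGen (fun e => decide (0 ≤ e)) (fun w e => decide (e < w)) o k l

def lnUpd (o : Option (Int × Int)) (k : Int) (l : List Int) : Option (Int × Int) :=
  updGen (fun e => decide (e < 0)) (fun w e => decide (w < e)) o k l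

def gnUpd (o : Option (Int × Int)) (k : Int) (l : List Int) : Option (Int × Int) :=
  updGen (fun e => decide (e < 0)) (fun w e => decide (e < w)) o k l

theorem updGen_spec (cond : Int → Bool) (better : Int → Int → Bool) (R : Int → Int → Prop)
    (hrefl : ∀ a, R a a) (htrans : ∀ a b c, R a b → R b c → R a c)
    (hbt : ∀ w e, better w e = true → R w e) (hbf : ∀ w e, better w e = false → R e w)
    (l : List Int) (k : Int) (o : Option (Int × Int)) (j v : Int)
    (h : updGen cond better o k l = some (j, v)) :
    ((o = some (j, v)) ∨ ∃ (m : Nat) (hm : m < l.length), j = k + m ∧ v = l[m] ∧ cond v = true)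
    ∧ (∀ x ∈ l, cond x = true → R x v)
    ∧ (∀ j₀ w, o = some (j₀, w) → R w v) := by
  induction l generalizing k o with
  | nil =>
    rw [updGen_nil] at h
    refine ⟨Or.inl h, by simp, ?_⟩
    intro j₀ w ho
    rw [ho] at h
    simp only [Option.some.injEq, Prod.mk.injEq] at h
    exact h.2 ▸ hrefl w
  | cons e xs ih =>
    rw [updGen_cons] at h
    by_cases hc : cond e
    · cases o with
      | none =>
        simp only [hc, if_true] at h
        obtain ⟨h1, h2, h3⟩ := ih _ _ h
        have hev : R e v := h3 k e rfl
        refine ⟨?_, ?_, by simp⟩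
        · rcases h1 with h1 | ⟨m, hm, hj, hv, hcv⟩
          · simp only [Option.some.injEq, Prod.mk.injEq] at h1
            exact Or.inr ⟨0, by simp, by simp [h1.1], by simp [h1.2.symm], by simp_all⟩
          · exact Or.inr ⟨m + 1, by simpa using hm, by rw [hj]; push_cast; ring, by simpa using hv, hcv⟩
        · intro x hx hcx
          rcases List.mem_cons.mp hx with rfl | hx
          · exact hev
          · exact h2 x hx hcx
      | some p =>
        obtain ⟨j₀', w'⟩ := p
        by_cases hb : better w' e
        · simp only [hc, hb, if_true] at h
          obtain ⟨h1, h2, h3⟩ := ih _ _ h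
          have hev : R e v := h3 k e rfl
          have hwv : R w' v := htrans _ _ _ (hbt _ _ hb) hev
          refine ⟨?_, ?_, ?_⟩
          · rcases h1 with h1 | ⟨m, hm, hj, hv, hcv⟩
            · simp only [Option.some.injEq, Prod.mk.injEq] at h1
              exact Or.inr ⟨0, by simp, by simp [h1.1], by simp [h1.2.symm], by simp_all⟩
            · exact Or.inr ⟨m + 1, by simpa using hm, by rw [hj]; push_cast; ring, by simpa using hv, hcv⟩
          · intro x hx hcx
            rcases List.mem_cons.mp hx with rfl | hx
            · exact hev
            · exact h2 x hx hcx
          · intro j₁ w₁ ho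
            simp only [Option.some.injEq, Prod.mk.injEq] at ho
            exact ho.2 ▸ hwv
        · simp only [hc, hb, if_true, if_false] at h
          obtain ⟨h1, h2, h3⟩ := ih _ _ h
          have hwv : R w' v := h3 j₀' w' rfl
          have hev : R e v := htrans _ _ _ (hbf _ _ (by simpa using hb)) hwv
          refine ⟨?_, ?_, ?_⟩
          · rcases h1 with h1 | ⟨m, hm, hj, hv, hcv⟩
            · exact Or.inl h1
            · exact Or.inr ⟨m + 1, by simpa using hm, by rw [hj]; push_cast; ring, by simpa using hv, hcv⟩
          · intro x hx hcx
            rcases List.mem_cons.mp hx with rfl | hx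
            · exact hev
            · exact h2 x hx hcx
          · intro j₁ w₁ ho
            simp only [Option.some.injEq, Prod.mk.injEq] at ho
            exact ho.2 ▸ hwv
    · simp only [hc, if_false] at h
      obtain ⟨h1, h2, h3⟩ := ih _ _ h
      refine ⟨?_, ?_, h3⟩
      · rcases h1 with h1 | ⟨m, hm, hj, hv, hcv⟩
        · exact Or.inl h1
        · exact Or.inr ⟨m + 1, by simpa using hm, by rw [hj]; push_cast; ring, by simpa using hv, hcv⟩
      · intro x hx hcx
        rcases List.mem_cons.mp hx with rfl | hx
        · exact absurd hcx (by simpa using hc)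
        · exact h2 x hx hcx

theorem updGen_none (cond : Int → Bool) (better : Int → Int → Bool)
    (l : List Int) (k : Int) (o : Option (Int × Int))
    (h : updGen cond better o k l = none) : o = none ∧ ∀ x ∈ l, cond x = false := by
  induction l generalizing k o with
  | nil => rw [updGen_nil] at h; exact ⟨h, by simp⟩
  | cons e xs ih =>
    rw [updGen_cons] at h
    obtain ⟨h1, h2⟩ := ih _ _ h
    by_cases hc : cond e
    · exfalso
      cases o with
      | none => simp [hc] at h1
      | some p => obtain ⟨a, b⟩ := p; by_cases hb : better b e <;> simp [hc, hb] at h1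
    · simp only [hc, if_false] at h1
      refine ⟨h1, ?_⟩
      intro x hx
      rcases List.mem_cons.mp hx with rfl | hx
      · simpa using hc
      · exact h2 x hx

theorem aFold_decomp (l : List Int) (k : Int) (c : Int)
    (a b d : Option (Int × Int)) :
    (PySem.List.enumerate l k).foldl pvAStep (c, a, b, d) =
      (c + (l.countP negP : Int), lnnUpd a k l, lnUpd b k l, gnUpd d k l) := by
  induction l generalizing k c a b d with
  | nil => simp [PySem.List.enumerate, lnnUpd, lnUpd, gnUpd, updGen]
  | cons e xs ih =>
    rw [PySem.List.enumerate_cons, List.foldl_cons]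
    by_cases he : e < 0
    · have h0 : ¬ (0 ≤ e) := by omega
      simp only [pvAStep, he, if_true]
      rw [ih]
      simp only [lnnUpd, lnUpd, gnUpd, updGen, he, h0, decide_true, decide_false,
        if_true, if_false, Prod.mk.injEq, List.countP_cons, negP, decide_eq_true_eq]
      push_cast; ring_nf; try trivial
    · have h0 : (0 ≤ e) := by omega
      simp only [pvAStep, he, if_false]
      rw [ih]
      simp only [lnnUpd, lnUpd, gnUpd, updGen, he, h0, decide_true, decide_false,
        if_true, if_false, Prod.mk.injEq, List.countP_cons, negP, decide_eq_true_eq]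
      trivial

theorem lnUpd_spec (l : List Int) (k : Int) (o : Option (Int × Int)) (j v : Int)
    (h : lnUpd o k l = some (j, v)) :
    ((o = some (j, v)) ∨ ∃ (m : Nat) (hm : m < l.length), j = k + m ∧ v = l[m] ∧ v < 0)
    ∧ (∀ x ∈ l, x < 0 → x ≤ v)
    ∧ (∀ j₀ w, o = some (j₀, w) → w ≤ v) := by
  have := updGen_spec (fun e => decide (e < 0)) (fun w e => decide (w < e)) (· ≤ ·)
    (fun a => le_refl a) (fun a b c => le_trans) (fun w e hb => le_of_lt (by simpa using hb))
    (fun w e hb => by simpa using hb) l k o j v h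
  refine ⟨?_, ?_, this.2.2⟩
  · rcases this.1 with h1 | ⟨m, hm, hj, hv, hc⟩
    · exact Or.inl h1
    · exact Or.inr ⟨m, hm, hj, hv, by simpa using hc⟩
  · intro x hx hneg; exact this.2.1 x hx (by simpa using hneg)

theorem gnUpd_spec (l : List Int) (k : Int) (o : Option (Int × Int)) (j v : Int)
    (h : gnUpd o k l = some (j, v)) :
    ((o = some (j, v)) ∨ ∃ (m : Nat) (hm : m < l.length), j = k + m ∧ v = l[m] ∧ v < 0)
    ∧ (∀ x ∈ l, x < 0 → v ≤ x)
    ∧ (∀ j₀ w, o = some (j₀, w) → v ≤ w) := by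
  have := updGen_spec (fun e => decide (e < 0)) (fun w e => decide (e < w)) (fun a b => b ≤ a)
    (fun a => le_refl a) (fun a b c h1 h2 => le_trans h2 h1)
    (fun w e hb => le_of_lt (by simpa using hb)) (fun w e hb => by simpa using hb) l k o j v h
  refine ⟨?_, ?_, this.2.2⟩
  · rcases this.1 with h1 | ⟨m, hm, hj, hv, hc⟩
    · exact Or.inl h1
    · exact Or.inr ⟨m, hm, hj, hv, by simpa using hc⟩
  · intro x hx hneg; exact this.2.1 x hx (by simpa using hneg)

theorem lnnUpd_spec (l : List Int) (k : Int) (o : Option (Int × Int)) (j v : Int)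
    (h : lnnUpd o k l = some (j, v)) :
    ((o = some (j, v)) ∨ ∃ (m : Nat) (hm : m < l.length), j = k + m ∧ v = l[m] ∧ ¬ v < 0)
    ∧ (∀ x ∈ l, ¬ x < 0 → v ≤ x)
    ∧ (∀ j₀ w, o = some (j₀, w) → v ≤ w) := by
  have := updGen_spec (fun e => decide (0 ≤ e)) (fun w e => decide (e < w)) (fun a b => b ≤ a)
    (fun a => le_refl a) (fun a b c h1 h2 => le_trans h2 h1)
    (fun w e hb => le_of_lt (by simpa using hb)) (fun w e hb => by simpa using hb) l k o j v h
  refine ⟨?_, ?_, this.2.2⟩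
  · rcases this.1 with h1 | ⟨m, hm, hj, hv, hc⟩
    · exact Or.inl h1
    · exact Or.inr ⟨m, hm, hj, hv, by simp at hc; omega⟩
  · intro x hx hneg; exact this.2.1 x hx (by simp; omega)

theorem lnUpd_none (l : List Int) (k : Int) (o : Option (Int × Int))
    (h : lnUpd o k l = none) : o = none ∧ ∀ x ∈ l, ¬ x < 0 := by
  obtain ⟨h1, h2⟩ := updGen_none _ _ l k o h
  exact ⟨h1, fun x hx => by simpa using h2 x hx⟩

theorem gnUpd_none (l : List Int) (k : Int) (o : Option (Int × Int))
    (h : gnUpd o k l = none) : o = none ∧ ∀ x ∈ l, ¬ x < 0 := by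
  obtain ⟨h1, h2⟩ := updGen_none _ _ l k o h
  exact ⟨h1, fun x hx => by simpa using h2 x hx⟩

theorem lnnUpd_none (l : List Int) (k : Int) (o : Option (Int × Int))
    (h : lnnUpd o k l = none) : o = none ∧ ∀ x ∈ l, x < 0 := by
  obtain ⟨h1, h2⟩ := updGen_none _ _ l k o h
  exact ⟨h1, fun x hx => by have := h2 x hx; simp at this; omega⟩

-- the product loop of A, characterized by which index is skipped
def pstep (idx : Option Int) (prod : Int) (q : Int × Int) : Int :=
  if some q.1 ≠ idx then prod * q.2 else prod


theorem pms_lt (l : List Int) (k : Int) (p : Int) (j : Int) (hj : j < k) :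
    (PySem.List.enumerate l k).foldl (pstep (some j)) p = p * l.prod := by
  induction l generalizing k p with
  | nil => simp [PySem.List.enumerate]
  | cons e xs ih =>
    rw [PySem.List.enumerate_cons, List.foldl_cons,
      show pstep (some j) p (k, e) = p * e from by simp [pstep]; omega,
      ih _ _ (by omega), List.prod_cons, mul_assoc]

theorem pms_at (l : List Int) (k : Int) (p : Int) (m : Nat) (hm : m < l.length) :
    (PySem.List.enumerate l k).foldl (pstep (some (k + m))) p = p * (l.eraseIdx m).prod := by
  induction l generalizing k p m with
  | nil => simp at hm
  | cons e xs ih =>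
    rw [PySem.List.enumerate_cons, List.foldl_cons]
    cases m with
    | zero =>
      rw [show pstep (some (k + (0:Nat))) p (k, e) = p from by simp [pstep],
        show ((k:Int) + (0:Nat)) = k from by simp,
        pms_lt xs (k + 1) p k (by omega)]
      simp
    | succ m' =>
      rw [show pstep (some (k + (m' + 1 : Nat))) p (k, e) = p * e from by
            simp [pstep]; push_cast; omega,
        show ((k:Int) + (m' + 1 : Nat)) = (k + 1) + (m' : Nat) from by push_cast; ring,
        ih (k + 1) (p * e) m' (by simpa using hm)]
      simp [List.eraseIdx_cons_succ, mul_assoc]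

-- arithmetic facts about products
theorem prod_eraseIdx_mul (l : List Int) (m : Nat) (hm : m < l.length) :
    (l.eraseIdx m).prod * l[m] = l.prod := by
  induction l generalizing m with
  | nil => simp at hm
  | cons e xs ih =>
    cases m with
    | zero => simp [mul_comm]
    | succ m' =>
      simp only [List.eraseIdx_cons_succ, List.prod_cons, List.getElem_cons_succ]
      rw [mul_assoc, ih m' (by simpa using hm)]

theorem countP_eraseIdx_of_not (l : List Int) (m : Nat) (hm : m < l.length)
    (h : negP l[m] = false) : (l.eraseIdx m).countP negP = l.countP negP := by
  induction l generalizing m with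
  | nil => simp at hm
  | cons e xs ih =>
    cases m with
    | zero => simp_all [List.countP_cons]
    | succ m' =>
      simp only [List.eraseIdx_cons_succ, List.countP_cons]
      rw [ih m' (by simpa using hm) (by simpa using h)]

theorem mem_eraseIdx_of_ne (l : List Int) (m : Nat) (hm : m < l.length) (y : Int)
    (hy : y ∈ l) (hne : y ≠ l[m]) : y ∈ l.eraseIdx m := by
  induction l generalizing m with
  | nil => simp at hm
  | cons a t ih =>
    cases m with
    | zero =>
      simp only [List.eraseIdx_cons_zero]
      rcases List.mem_cons.mp hy with rfl | h
      · exact absurd (by simp) hne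
      · exact h
    | succ m' =>
      simp only [List.eraseIdx_cons_succ]
      rcases List.mem_cons.mp hy with rfl | h
      · exact List.mem_cons_self
      · exact List.mem_cons_of_mem _ (ih m' (by simpa using hm) h (by simpa using hne))

theorem getElem_mem_eraseIdx (l : List Int) (m i : Nat) (hm : m < l.length)
    (hi : i < l.length) (hne : i ≠ m) : l[i] ∈ l.eraseIdx m := by
  induction l generalizing m i with
  | nil => simp at hm
  | cons a t ih =>
    cases m with
    | zero =>
      cases i with
      | zero => omega
      | succ i' =>
        simp only [List.eraseIdx_cons_zero, List.getElem_cons_succ]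
        exact List.getElem_mem _
    | succ m' =>
      cases i with
      | zero => simp [List.eraseIdx_cons_succ]
      | succ i' =>
        simp only [List.eraseIdx_cons_succ, List.getElem_cons_succ]
        exact List.mem_cons_of_mem _
          (ih m' i' (by simpa using hm) (by simpa using hi) (by omega))

theorem getElem_of_not_mem_eraseIdx (l : List Int) (i : Nat) (hi : i < l.length)
    (y : Int) (hy : y ∈ l) (h : y ∉ l.eraseIdx i) : l[i] = y := by
  induction l generalizing i with
  | nil => simp at hy
  | cons a t ih =>
    cases i with
    | zero =>
      simp only [List.eraseIdx_cons_zero] at h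
      rcases List.mem_cons.mp hy with rfl | hmem
      · simp
      · exact absurd hmem h
    | succ i' =>
      simp only [List.eraseIdx_cons_succ] at h
      have hna : y ≠ a := fun hya => h (hya ▸ List.mem_cons_self)
      have hyt : y ∈ t := by rcases List.mem_cons.mp hy with rfl | hmem
                             · exact absurd rfl hna
                             · exact hmem
      simp only [List.getElem_cons_succ]
      exact ih i' (by simpa using hi) hyt (fun hmem => h (List.mem_cons_of_mem _ hmem))

theorem prod_sign (l : List Int) (h : ∀ x ∈ l, x ≠ 0) :
    (l.countP negP % 2 = 0 → 0 < l.prod) ∧ (l.countP negP % 2 = 1 → l.prod < 0) := by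
  induction l with
  | nil => simp
  | cons e xs ih =>
    have he : e ≠ 0 := h e (by simp)
    have ihh := ih (fun x hx => h x (by simp [hx]))
    rw [List.prod_cons]
    by_cases hneg : e < 0
    · have hc : List.countP negP (e :: xs) = List.countP negP xs + 1 := by
        simp [List.countP_cons, negP, hneg]
      rw [hc]
      constructor
      · intro hpar; exact mul_pos_of_neg_of_neg hneg (ihh.2 (by omega))
      · intro hpar; exact mul_neg_of_neg_of_pos hneg (ihh.1 (by omega))
    · have hc : List.countP negP (e :: xs) = List.countP negP xs := by
        simp [List.countP_cons, negP, hneg]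
      rw [hc]
      have hpos : 0 < e := by omega
      constructor
      · intro hpar; exact mul_pos hpos (ihh.1 hpar)
      · intro hpar; exact mul_neg_of_pos_of_neg hpos (ihh.2 hpar)

-- B-side descriptions
def sufAux (r : Int) : List Int → List Int
  | [] => []
  | x :: xs => r :: sufAux (r * x) xs

def sufs : List Int → List Int
  | [] => []
  | _ :: xs => xs.prod :: sufs xs

def candL : List Int → Int → List Int
  | [], _ => []
  | x :: xs, left => (left * xs.prod) :: candL xs (left * x)

def foldMaxO (o : Option Int) (c : List Int) : Option Int :=
  c.foldl (fun o c => match o with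
    | none => some c
    | some b => if b < c then some c else some b) o


theorem foldMaxO_cons_none (y : Int) (c : List Int) :
    foldMaxO none (y :: c) = foldMaxO (some y) c := rfl

theorem foldMaxO_cons_some (b y : Int) (c : List Int) :
    foldMaxO (some b) (y :: c) = foldMaxO (if b < y then some y else some b) c := rfl

theorem bfold1 (l : List Int) (acc : List Int) (r : Int) :
    l.foldl (fun (st : List Int × Int) x => (st.1 ++ [st.2], st.2 * x)) (acc, r)
      = (acc ++ sufAux r l, r * l.prod) := by
  induction l generalizing acc r with
  | nil => simp [sufAux]
  | cons x xs ih =>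
    rw [List.foldl_cons, ih]
    simp [sufAux, mul_assoc]

theorem sufAux_append (u v : List Int) (r : Int) :
    sufAux r (u ++ v) = sufAux r u ++ sufAux (r * u.prod) v := by
  induction u generalizing r with
  | nil => simp [sufAux]
  | cons x u' ih =>
    simp only [List.cons_append, sufAux, List.prod_cons]
    rw [ih, mul_assoc]

theorem sufAux_rev (l : List Int) : (sufAux 1 l.reverse).reverse = sufs l := by
  induction l with
  | nil => simp [sufAux, sufs]
  | cons x xs ih =>
    rw [List.reverse_cons, sufAux_append]
    simp only [sufAux, List.reverse_append, List.reverse_cons, List.reverse_nil,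
      List.nil_append, List.cons_append, List.prod_reverse, one_mul]
    rw [ih]
    simp [sufs]

theorem bfold2 (l : List Int) (o : Option Int) (left : Int) :
    (l.zip (sufs l)).foldl
      (fun (st : Option Int × Int) p =>
        ((match st.1 with
          | none => some (st.2 * p.2)
          | some b => if b < st.2 * p.2 then some (st.2 * p.2) else some b), st.2 * p.1))
      (o, left)
      = (foldMaxO o (candL l left), left * l.prod) := by
  induction l generalizing o left with
  | nil => simp [sufs, candL, foldMaxO]
  | cons x xs ih =>
    simp only [sufs, List.zip_cons_cons, List.foldl_cons]
    rw [ih]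
    cases o with
    | none =>
      simp only [candL, List.prod_cons]
      rw [foldMaxO_cons_none]
      simp only [Prod.mk.injEq]
      exact ⟨trivial, by ring⟩
    | some b =>
      simp only [candL, List.prod_cons]
      rw [foldMaxO_cons_some]
      simp only [Prod.mk.injEq]
      exact ⟨trivial, by ring⟩

theorem candL_eq (l : List Int) (left : Int) :
    candL l left = (List.range l.length).map (fun i => left * (l.eraseIdx i).prod) := by
  induction l generalizing left with
  | nil => simp [candL]
  | cons x xs ih =>
    simp only [candL, List.length_cons, List.range_succ_eq_map, List.map_cons,
      List.eraseIdx_cons_zero, List.map_map]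
    congr 1
    rw [ih (left * x)]
    apply List.map_congr_left
    intro i hi
    simp only [Function.comp_apply, List.eraseIdx_cons_succ, List.prod_cons]
    ring

theorem foldMaxO_some (c : List Int) (b : Int) :
    ∃ M, foldMaxO (some b) c = some M ∧ (M = b ∨ M ∈ c) ∧ b ≤ M ∧ ∀ y ∈ c, y ≤ M := by
  induction c generalizing b with
  | nil => exact ⟨b, rfl, Or.inl rfl, le_refl b, by simp⟩
  | cons y c' ih =>
    rw [foldMaxO_cons_some]
    by_cases hby : b < y
    · obtain ⟨M, hM, hmem, hle, hub⟩ := ih y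
      rw [if_pos hby]
      refine ⟨M, hM, ?_, le_trans (le_of_lt hby) hle, ?_⟩
      · rcases hmem with rfl | hmem
        · exact Or.inr (List.mem_cons_self)
        · exact Or.inr (List.mem_cons_of_mem _ hmem)
      · intro z hz
        rcases List.mem_cons.mp hz with rfl | hz
        · exact hle
        · exact hub z hz
    · obtain ⟨M, hM, hmem, hle, hub⟩ := ih b
      rw [if_neg hby]
      refine ⟨M, hM, ?_, hle, ?_⟩
      · rcases hmem with rfl | hmem
        · exact Or.inl rfl
        · exact Or.inr (List.mem_cons_of_mem _ hmem)
      · intro z hz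
        rcases List.mem_cons.mp hz with rfl | hz
        · omega
        · exact hub z hz

theorem foldMaxO_cons (c : List Int) (y : Int) :
    ∃ M, foldMaxO none (y :: c) = some M ∧ M ∈ y :: c ∧ ∀ z ∈ y :: c, z ≤ M := by
  rw [foldMaxO_cons_none]
  obtain ⟨M, hM, hmem, hle, hub⟩ := foldMaxO_some c y
  refine ⟨M, hM, ?_, ?_⟩
  · rcases hmem with rfl | hmem
    · exact List.mem_cons_self
    · exact List.mem_cons_of_mem _ hmem
  · intro z hz
    rcases List.mem_cons.mp hz with rfl | hz
    · exact hle
    · exact hub z hz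

theorem max_eq_of (c : List Int) (M x : Int) (hmem : M ∈ c) (hub : ∀ z ∈ c, z ≤ M)
    (hx : x ∈ c) (hxub : ∀ z ∈ c, z ≤ x) : M = x := by
  exact le_antisymm (hxub M hmem) (hub x hx)

-- the heart: A's chosen skip index maximizes the skip-one product
theorem cand_le_main (A : List Int) (m : Nat) (hm : m < A.length) (i : Nat) (hi : i < A.length)
    (hcase :
      (A.countP negP % 2 = 1 ∧ A[m] < 0 ∧ (∀ x ∈ A, x < 0 → x ≤ A[m]))
      ∨ (A.countP negP % 2 = 0 ∧ ¬ A[m] < 0 ∧ (∀ x ∈ A, ¬ x < 0 → A[m] ≤ x))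
      ∨ (A.countP negP % 2 = 0 ∧ (∀ x ∈ A, x < 0) ∧ (∀ x ∈ A, x < 0 → A[m] ≤ x))) :
    (A.eraseIdx i).prod ≤ (A.eraseIdx m).prod := by
  have hEm := prod_eraseIdx_mul A m hm
  have hEi := prod_eraseIdx_mul A i hi
  rcases hcase with ⟨hodd, hvneg, hub⟩ | ⟨heven, hvnn, hlb⟩ | ⟨heven, hallneg, hlb⟩
  · -- odd number of negatives: skip the greatest (closest to zero) negative
    by_cases hz : (0 : Int) ∈ A
    · have h0er : (0 : Int) ∈ A.eraseIdx m :=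
        mem_eraseIdx_of_ne A m hm 0 hz (by omega)
      rw [List.prod_eq_zero h0er]
      by_cases hz2 : (0 : Int) ∈ A.eraseIdx i
      · exact le_of_eq (List.prod_eq_zero hz2)
      · have hAi : A[i] = 0 := getElem_of_not_mem_eraseIdx A i hi 0 hz hz2
        have hcnt : (A.eraseIdx i).countP negP = A.countP negP :=
          countP_eraseIdx_of_not A i hi (by simp [negP, hAi])
        have hnz : ∀ x ∈ A.eraseIdx i, x ≠ 0 := fun x hx h0 => hz2 (h0 ▸ hx)
        exact le_of_lt ((prod_sign _ hnz).2 (by rw [hcnt]; omega))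
    · have hnz : ∀ x ∈ A, x ≠ 0 := fun x hx h0 => hz (h0 ▸ hx)
      have hP : A.prod < 0 := (prod_sign A hnz).2 hodd
      have hPm : 0 < (A.eraseIdx m).prod := by nlinarith
      by_cases hineg : A[i] < 0
      · have hle : A[i] ≤ A[m] := hub _ (List.getElem_mem hi) hineg
        nlinarith [mul_nonneg (le_of_lt hPm) (sub_nonneg.mpr hle)]
      · have hipos : 0 < A[i] := by
          have := hnz A[i] (List.getElem_mem hi); omega
        nlinarith
  · -- even number of negatives, some nonnegative element: skip the least nonnegative
    by_cases hv0 : A[m] = 0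
    · by_cases him : i = m
      · subst him; exact le_refl _
      · have hmem : A[m] ∈ A.eraseIdx i := getElem_mem_eraseIdx A i m hi hm (Ne.symm him)
        rw [List.prod_eq_zero (hv0 ▸ hmem)]
        by_cases hz2 : (0 : Int) ∈ A.eraseIdx m
        · exact le_of_eq (List.prod_eq_zero hz2).symm
        · have hcnt : (A.eraseIdx m).countP negP = A.countP negP :=
            countP_eraseIdx_of_not A m hm (by simp [negP, hv0])
          have hnz : ∀ x ∈ A.eraseIdx m, x ≠ 0 := fun x hx h0 => hz2 (h0 ▸ hx)
          exact le_of_lt ((prod_sign _ hnz).1 (by rw [hcnt]; omega))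
    · have hvpos : 0 < A[m] := by omega
      have hnz : ∀ x ∈ A, x ≠ 0 := by
        intro x hx h0
        have := hlb x hx (by omega)
        omega
      have hP : 0 < A.prod := (prod_sign A hnz).1 heven
      have hPm : 0 < (A.eraseIdx m).prod := by nlinarith
      by_cases hineg : A[i] < 0
      · nlinarith
      · have hge : A[m] ≤ A[i] := hlb _ (List.getElem_mem hi) hineg
        nlinarith [mul_nonneg (le_of_lt hPm) (sub_nonneg.mpr hge)]
  · -- all elements negative, evenly many: skip the most negative one
    have hvneg : A[m] < 0 := hallneg _ (List.getElem_mem hm)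
    have hineg : A[i] < 0 := hallneg _ (List.getElem_mem hi)
    have hnz : ∀ x ∈ A, x ≠ 0 := fun x hx h0 => by have := hallneg x hx; omega
    have hP : 0 < A.prod := (prod_sign A hnz).1 heven
    have hPm : (A.eraseIdx m).prod < 0 := by nlinarith
    have hle : A[m] ≤ A[i] := hlb _ (List.getElem_mem hi) hineg
    have hkey : 0 ≤ (A.eraseIdx m).prod * (A[m] - A[i]) := by
      have h1 : (A.eraseIdx m).prod ≤ 0 := le_of_lt hPm
      have h2 : A[m] - A[i] ≤ 0 := by omega
      nlinarith
    nlinarith [hkey]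

-- assembling the two sides
theorem find_biggest_main : ∀ (A : List Int), A ≠ [] →
    find_biggest_n_minus_one_product A = find_biggest_n_minus_one_product_alt A := by
  intro A hA
  have hn : 0 < A.length := List.length_pos_iff.mpr hA
  -- B computes the maximum of all skip-one candidate products
  have hBalt : find_biggest_n_minus_one_product_alt A
      = (foldMaxO none (candL A 1)).getD 1 := by
    unfold find_biggest_n_minus_one_product_alt
    rw [if_neg hA]
    simp only [bfold1, List.nil_append, sufAux_rev, bfold2]
  have hcand : candL A 1 = (List.range A.length).map (fun i => (A.eraseIdx i).prod) := by
    rw [candL_eq]; simp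
  have hcne : candL A 1 ≠ [] := by
    rw [hcand]
    simp only [ne_eq, List.map_eq_nil_iff, List.range_eq_nil]
    omega
  obtain ⟨y, c, hyc⟩ := List.exists_cons_of_ne_nil hcne
  obtain ⟨M, hM, hMmem, hMub⟩ := foldMaxO_cons c y
  have hBM : find_biggest_n_minus_one_product_alt A = M := by
    rw [hBalt, hyc, hM]; rfl
  -- once A's chosen index is optimal, the two sides agree
  have main : ∀ (m : Nat) (hm : m < A.length),
      ((A.countP negP % 2 = 1 ∧ A[m]'hm < 0 ∧ (∀ x ∈ A, x < 0 → x ≤ A[m]'hm))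
        ∨ (A.countP negP % 2 = 0 ∧ ¬ A[m]'hm < 0 ∧ (∀ x ∈ A, ¬ x < 0 → A[m]'hm ≤ x))
        ∨ (A.countP negP % 2 = 0 ∧ (∀ x ∈ A, x < 0) ∧ (∀ x ∈ A, x < 0 → A[m]'hm ≤ x))) →
      product_minus_skip_index A (some ((0:Int) + (m : Nat))) = find_biggest_n_minus_one_product_alt A := by
    intro m hm hcase
    have hval : product_minus_skip_index A (some ((0:Int) + (m : Nat)))
        = 1 * (A.eraseIdx m).prod := pms_at A 0 1 m hm
    rw [hval, one_mul, hBM]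
    have hmemc : (A.eraseIdx m).prod ∈ candL A 1 := by
      rw [hcand]; exact List.mem_map.mpr ⟨m, List.mem_range.mpr hm, rfl⟩
    have hub : ∀ z ∈ candL A 1, z ≤ (A.eraseIdx m).prod := by
      intro z hz
      rw [hcand] at hz
      obtain ⟨i, hi, rfl⟩ := List.mem_map.mp hz
      exact cand_le_main A m hm i (List.mem_range.mp hi) hcase
    exact ((max_eq_of (candL A 1) M ((A.eraseIdx m).prod)
      (by rw [hyc]; exact hMmem) (by intro z hz; exact hMub z (by rw [← hyc]; exact hz))
      hmemc hub)).symm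
  -- A's side: reduce the selection fold
  unfold find_biggest_n_minus_one_product
  rw [aFold_decomp]
  simp only [zero_add]
  by_cases hpar : (A.countP negP : Int) % 2 = 1
  · have hcond : (PySem.Int.mod (A.countP negP : Int) 2 == 1) = true := by
      rw [PySem.Int.mod_eq_emod_of_pos (by norm_num)]
      exact beq_iff_eq.mpr hpar
    rw [hcond]
    simp only [if_true]
    rcases hln : lnUpd none 0 A with _ | ⟨j, v⟩
    · exfalso
      have hall := (lnUpd_none A 0 none hln).2
      have : A.countP negP = 0 := List.countP_eq_zero.mpr (by
        intro x hx
        simp only [negP, decide_eq_true_eq]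
        exact hall x hx)
      omega
    · obtain ⟨h1, h2, _⟩ := lnUpd_spec A 0 none j v hln
      rcases h1 with h1 | ⟨m, hm, hj, hv, hneg⟩
      · simp at h1
      · simp only [Option.map_some]
        rw [hj]
        exact main m hm (Or.inl ⟨by omega, by rw [← hv]; exact hneg,
          by intro x hx hxneg; rw [← hv]; exact h2 x hx hxneg⟩)
  · have hcond : (PySem.Int.mod (A.countP negP : Int) 2 == 1) = false := by
      rw [PySem.Int.mod_eq_emod_of_pos (by norm_num)]
      exact beq_eq_false_iff_ne.mpr hpar
    rw [hcond]
    simp only [if_false, Bool.false_eq_true]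
    have hevenNat : A.countP negP % 2 = 0 := by omega
    rcases hlnn : lnnUpd none 0 A with _ | ⟨j, v⟩
    · rcases hgn : gnUpd none 0 A with _ | ⟨j, v⟩
      · exfalso
        obtain ⟨x, hx⟩ := List.exists_mem_of_ne_nil A hA
        have h1 := (lnnUpd_none A 0 none hlnn).2 x hx
        have h2 := (gnUpd_none A 0 none hgn).2 x hx
        omega
      · obtain ⟨h1, h2, _⟩ := gnUpd_spec A 0 none j v hgn
        rcases h1 with h1 | ⟨m, hm, hj, hv, hneg⟩
        · simp at h1
        · simp only [Option.map_some]
          rw [hj]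
          exact main m hm (Or.inr (Or.inr ⟨hevenNat,
            (lnnUpd_none A 0 none hlnn).2,
            by intro x hx hxneg; rw [← hv]; exact h2 x hx hxneg⟩))
    · obtain ⟨h1, h2, _⟩ := lnnUpd_spec A 0 none j v hlnn
      rcases h1 with h1 | ⟨m, hm, hj, hv, hnn⟩
      · simp at h1
      · rw [hj]
        exact main m hm (Or.inr (Or.inl ⟨hevenNat, by rw [← hv]; exact hnn,
          by intro x hx hxnn; rw [← hv]; exact h2 x hx hxnn⟩))

-- ===== VERDICT (by name: the statement is the Claim_ definition above) =====
theorem find_biggest_n_minus_one_product_spec : Claim_equal_find_biggest_n_minus_one_product := by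
  intro A _
  unfold Spec_find_biggest_n_minus_one_product
  by_cases hA : A = []
  · subst hA; rfl
  · exact find_biggest_main A hA
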